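-- pv_equiv track=rewrite | github.com/VictorF13/terminal-dex-scraper | src/terminal_dex_scraper/gen_1/red_and_blue/scrapers/evolutions_and_moves.py | _split_raw_data_into_records
-- ===== SOURCE A (Python) =====
-- def _split_raw_data_into_records(
--     evolution_raw_list: list[str]
-- ) -> list[list[str]]:
--     """Split raw data list into individual record lists.
--
--     Args:
--         evolution_raw_list: The raw list of evolution and move data lines.
--
--     Returns:
--         A list of record lists, where each record list contains the raw data
--         for a single Pokémon.
--
--     """
--     _number_of_sections: int = 2
--     raw_data_per_record: list[list[str]] = []
--     break_point_count: int = 0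
--     current_record_raw_data: list[str] = []
--     for line in evolution_raw_list:
--         current_record_raw_data.append(line)
--         if line == "db 0":
--             break_point_count += 1
--             if break_point_count == _number_of_sections:
--                 raw_data_per_record.append(current_record_raw_data)
--                 current_record_raw_data = []
--                 break_point_count = 0
--     return raw_data_per_record
-- ===== SOURCE B (Python) =====
-- def _split_raw_data_into_records(
--     evolution_raw_list: list[str]
-- ) -> list[list[str]]:
--     """Split raw data into records, each ending at every second "db 0" line.
--
--     Recursive decomposition: find the first two "db 0" markers, cut the record
--     there (inclusive), and recurse on the remainder; trailing lines without a
--     completing second marker are dropped.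
--     """
--     if "db 0" not in evolution_raw_list:
--         return []
--     i = evolution_raw_list.index("db 0")
--     tail = evolution_raw_list[i + 1:]
--     if "db 0" not in tail:
--         return []
--     j = tail.index("db 0")
--     cut = i + 1 + j + 1
--     return [evolution_raw_list[:cut]] + _split_raw_data_into_records(
--         evolution_raw_list[cut:]
--     )
-- ===== Notes on version B (the rewrite author's own statement) =====
-- stated objective: alternative
-- what changed: Replaces A's single-pass fold carrying a record accumulator and a marker counter by a recursive decomposition that locates the first two 'db 0' markers with list.index and slices the record off, recursing on the remainder.
import Mathlib
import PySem

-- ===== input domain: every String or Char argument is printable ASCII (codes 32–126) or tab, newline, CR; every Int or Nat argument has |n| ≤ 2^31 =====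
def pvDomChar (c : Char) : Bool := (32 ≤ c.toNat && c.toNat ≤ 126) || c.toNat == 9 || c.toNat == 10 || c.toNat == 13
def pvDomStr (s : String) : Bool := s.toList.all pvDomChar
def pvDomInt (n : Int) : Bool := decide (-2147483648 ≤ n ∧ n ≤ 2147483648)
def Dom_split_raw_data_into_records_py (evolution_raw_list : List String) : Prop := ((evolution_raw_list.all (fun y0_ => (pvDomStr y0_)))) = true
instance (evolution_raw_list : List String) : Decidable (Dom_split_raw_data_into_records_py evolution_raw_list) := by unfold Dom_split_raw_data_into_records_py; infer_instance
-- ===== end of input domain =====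

-- B replaces A's one-pass fold (record accumulator + marker counter) by a recursion that
-- finds the first two "db 0" markers and slices the record off; return values are equal.

-- ===== PORT A =====
-- loop body of A: state = (raw_data_per_record, break_point_count, current_record_raw_data)
def pvStepA (st : List (List String) × Int × List String) (line : String) :
    List (List String) × Int × List String :=
  let cur := st.2.2 ++ [line]
  if line == "db 0" then
    if st.2.1 + 1 == 2 then (st.1 ++ [cur], 0, ([] : List String))
    else (st.1, st.2.1 + 1, cur)
  else (st.1, st.2.1, cur)

def split_raw_data_into_records_py (evolution_raw_list : List String) : List (List String) :=
  (evolution_raw_list.foldl pvStepA (([] : List (List String)), (0 : Int), ([] : List String))).1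

-- ===== PORT B =====
-- '"db 0" in lst' followed by 'lst.index("db 0")' is ported as one match on PySem.List.index?
def split_raw_data_into_records_py_alt (evolution_raw_list : List String) : List (List String) :=
  match h1 : PySem.List.index? evolution_raw_list "db 0" with
  | none => []
  | some i =>
    match PySem.List.index? (PySem.List.slice evolution_raw_list (some ((i : Int) + 1)) none) "db 0" with
    | none => []
    | some j =>
      PySem.List.slice evolution_raw_list none (some ((i : Int) + 1 + (j : Int) + 1)) ::
        split_raw_data_into_records_py_alt
          (PySem.List.slice evolution_raw_list (some ((i : Int) + 1 + (j : Int) + 1)) none)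
termination_by evolution_raw_list.length
decreasing_by
  obtain ⟨hi, -, -⟩ := PySem.List.getElem_of_index?_eq_some h1
  have : ((i : Int) + 1 + (j : Int) + 1) = ((i + 1 + j + 1 : Nat) : Int) := by push_cast; ring
  rw [this, PySem.List.slice_from_natCast]
  simp only [List.length_drop]
  omega

-- ===== PRECONDITION & SPEC =====
def Spec_split_raw_data_into_records_py (evolution_raw_list : List String) (out : List (List String)) : Prop := out = split_raw_data_into_records_py_alt evolution_raw_list
instance (evolution_raw_list : List String) (out : List (List String)) : Decidable (Spec_split_raw_data_into_records_py evolution_raw_list out) := by unfold Spec_split_raw_data_into_records_py; infer_instance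

-- ===== CLAIM (what is proved, stated in full; the proofs are below) =====
def Claim_equal_split_raw_data_into_records_py : Prop := ∀ (evolution_raw_list : List String), Dom_split_raw_data_into_records_py evolution_raw_list → Spec_split_raw_data_into_records_py evolution_raw_list (split_raw_data_into_records_py evolution_raw_list)

-- ===== LEMMAS AND PROOFS =====

-- A's loop from a state with one marker already counted: the record completes at the
-- first "db 0" of the remaining lines (or never).
theorem pv_loop_one (xs : List String) : ∀ (acc : List (List String)) (cur : List String),
    (xs.foldl pvStepA (acc, (1 : Int), cur)).1 =
      match PySem.List.index? xs "db 0" with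
      | none => acc
      | some k => ((xs.drop (k + 1)).foldl pvStepA (acc ++ [cur ++ xs.take (k + 1)], (0 : Int), ([] : List String))).1 := by
  induction xs with
  | nil => intro acc cur; simp [PySem.List.index?]
  | cons x xs ih =>
    intro acc cur
    by_cases hx : x = "db 0"
    · subst hx
      rw [PySem.List.index?_cons_self]
      simp [pvStepA]
    · rw [PySem.List.index?_cons_of_ne xs hx]
      have : pvStepA (acc, (1 : Int), cur) x = (acc, (1 : Int), cur ++ [x]) := by
        simp [pvStepA, hx]
      rw [List.foldl_cons, this, ih]
      cases h : PySem.List.index? xs "db 0" with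
      | none => simp
      | some k => simp

-- A's loop from a fresh-record state: the first "db 0" moves the counter to one.
theorem pv_loop_zero (xs : List String) : ∀ (acc : List (List String)) (cur : List String),
    (xs.foldl pvStepA (acc, (0 : Int), cur)).1 =
      match PySem.List.index? xs "db 0" with
      | none => acc
      | some k => ((xs.drop (k + 1)).foldl pvStepA (acc, (1 : Int), cur ++ xs.take (k + 1))).1 := by
  induction xs with
  | nil => intro acc cur; simp [PySem.List.index?]
  | cons x xs ih =>
    intro acc cur
    by_cases hx : x = "db 0"
    · subst hx
      rw [PySem.List.index?_cons_self]
      simp [pvStepA]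
    · rw [PySem.List.index?_cons_of_ne xs hx]
      have : pvStepA (acc, (0 : Int), cur) x = (acc, (0 : Int), cur ++ [x]) := by
        simp [pvStepA, hx]
      rw [List.foldl_cons, this, ih]
      cases h : PySem.List.index? xs "db 0" with
      | none => simp
      | some k => simp

theorem pv_main (n : Nat) : ∀ (xs : List String), xs.length ≤ n → ∀ (acc : List (List String)),
    (xs.foldl pvStepA (acc, (0 : Int), ([] : List String))).1 =
      acc ++ split_raw_data_into_records_py_alt xs := by
  induction n with
  | zero =>
    intro xs hxs acc
    have : xs = [] := List.eq_nil_of_length_eq_zero (Nat.le_zero.mp hxs)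
    subst this
    simp [split_raw_data_into_records_py_alt]
  | succ n ih =>
    intro xs hxs acc
    rw [pv_loop_zero]
    cases h1 : PySem.List.index? xs "db 0" with
    | none =>
      dsimp only
      rw [split_raw_data_into_records_py_alt, h1]
      simp
    | some i =>
      dsimp only
      rw [pv_loop_one]
      have hslice : PySem.List.slice xs (some ((i : Int) + 1)) none = xs.drop (i + 1) := by
        have : ((i : Int) + 1) = ((i + 1 : Nat) : Int) := by push_cast; ring
        rw [this, PySem.List.slice_from_natCast]
      cases h2 : PySem.List.index? (xs.drop (i + 1)) "db 0" with
      | none =>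
        dsimp only
        rw [split_raw_data_into_records_py_alt, h1]
        dsimp only
        rw [hslice, h2]
        simp
      | some j =>
        dsimp only
        have hi : i < xs.length := by
          obtain ⟨hk, _, _⟩ := PySem.List.getElem_of_index?_eq_some h1
          exact hk
        have hrest : (((xs.drop (i + 1)).drop (j + 1)).length) ≤ n := by
          simp only [List.length_drop]; omega
        rw [split_raw_data_into_records_py_alt, h1]
        dsimp only
        rw [hslice, h2]
        dsimp only
        have hcut : ((i : Int) + 1 + (j : Int) + 1) = ((i + 1 + j + 1 : Nat) : Int) := by
          push_cast; ring
        rw [hcut, PySem.List.slice_from_natCast, PySem.List.slice_to_natCast]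
        rw [ih _ hrest]
        have htake : xs.take (i + 1) ++ (xs.drop (i + 1)).take (j + 1) = xs.take (i + 1 + j + 1) := by
          rw [← List.take_add, show i + 1 + (j + 1) = i + 1 + j + 1 from by omega]
        have hdrop : (xs.drop (i + 1)).drop (j + 1) = xs.drop (i + 1 + j + 1) := by
          rw [List.drop_drop]; ring_nf
        simp only [List.nil_append]
        rw [htake, hdrop]
        simp

-- ===== VERDICT (by name: the statement is the Claim_ definition above) =====
theorem split_raw_data_into_records_py_spec : Claim_equal_split_raw_data_into_records_py := by
  intro xs _
  unfold Spec_split_raw_data_into_records_py split_raw_data_into_records_py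
  simpa using pv_main xs.length xs le_rfl []
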